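-- pv_equiv track=rewrite | github.com/arnor-sigurdsson/EIR | eir/models/input/array/models_locally_connected.py | _adjust_auto_params
-- ===== SOURCE A (Python) =====
-- from typing import (
--     TYPE_CHECKING,
--     Callable,
--     List,
--     Literal,
--     Optional,
--     Protocol,
--     Sequence,
--     Union,
-- )
--
-- def _adjust_auto_params(
--     cur_out_feature_sets: int, cur_kernel_width: int, direction: Literal["down", "up"]
-- ) -> tuple[int, int]:
--     """
--     Down: increase kernel width until it is larger than the number of output feature
--     sets.
--     Up: increase number of output feature sets until it is larger than the kernel width.
--
--     """
--     if direction == "down":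
--         while cur_out_feature_sets >= cur_kernel_width:
--             cur_kernel_width *= 2
--     elif direction == "up":
--         while cur_out_feature_sets <= cur_kernel_width:
--             cur_out_feature_sets *= 2
--     else:
--         raise ValueError(f"Unknown direction: {direction}")
--
--     return cur_out_feature_sets, cur_kernel_width
-- ===== SOURCE B (Python) =====
-- def _adjust_auto_params(
--     cur_out_feature_sets: int, cur_kernel_width: int, direction
-- ) -> tuple[int, int]:
--     """Closed-form: compute the number of doublings directly via bit_length."""
--     if direction == "down":
--         if cur_out_feature_sets >= cur_kernel_width:
--             cur_kernel_width <<= (cur_out_feature_sets // cur_kernel_width).bit_length()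
--     elif direction == "up":
--         if cur_out_feature_sets <= cur_kernel_width:
--             cur_out_feature_sets <<= (cur_kernel_width // cur_out_feature_sets).bit_length()
--     else:
--         raise ValueError(f"Unknown direction: {direction}")
--
--     return cur_out_feature_sets, cur_kernel_width
-- ===== Notes on version B (the rewrite author's own statement) =====
-- stated objective: faster
-- what changed: Replaces each doubling while-loop by a closed-form shift: the number of doublings is computed directly as (larger // smaller).bit_length() and applied with one left shift.
import Mathlib
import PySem

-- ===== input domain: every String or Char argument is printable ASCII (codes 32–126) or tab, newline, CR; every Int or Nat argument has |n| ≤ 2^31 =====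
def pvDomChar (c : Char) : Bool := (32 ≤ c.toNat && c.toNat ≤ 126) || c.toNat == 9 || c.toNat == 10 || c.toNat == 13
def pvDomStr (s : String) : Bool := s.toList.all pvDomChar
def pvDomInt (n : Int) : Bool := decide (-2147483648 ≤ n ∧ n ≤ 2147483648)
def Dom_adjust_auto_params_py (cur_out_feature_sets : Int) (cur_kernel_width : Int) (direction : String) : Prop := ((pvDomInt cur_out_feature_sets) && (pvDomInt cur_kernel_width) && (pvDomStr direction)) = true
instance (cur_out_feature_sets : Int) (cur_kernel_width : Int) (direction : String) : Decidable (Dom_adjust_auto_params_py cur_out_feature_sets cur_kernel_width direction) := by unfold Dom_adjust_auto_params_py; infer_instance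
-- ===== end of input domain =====

-- ===== PORT A =====
-- B is an O(1) closed form (bit_length shift) replacing A's doubling loop; A raises
-- ValueError on unknown directions and loops forever when the doubled value is ≤ 0 —
-- both excluded by Pre_.

-- A's `while` loop, doubling x while x ≤ bound. The extra `0 < x` conjunct is a
-- totality guard only: when x ≤ bound and x ≤ 0 the Python loop never terminates
-- (those inputs are excluded by Pre_); on all other inputs the guard never fires
-- before the loop condition fails.
def doubleUntilGt (x bound : Int) : Int :=
  if _h : x ≤ bound ∧ 0 < x then doubleUntilGt (x * 2) bound else x
termination_by (bound + 1 - x).toNat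
decreasing_by omega

def adjust_auto_params_py (cur_out_feature_sets : Int) (cur_kernel_width : Int) (direction : String) : Int × Int :=
  if direction = "down" then
    (cur_out_feature_sets, doubleUntilGt cur_kernel_width cur_out_feature_sets)
  else if direction = "up" then
    (doubleUntilGt cur_out_feature_sets cur_kernel_width, cur_kernel_width)
  else
    (cur_out_feature_sets, cur_kernel_width)  -- Python: raise ValueError (excluded by Pre_)

-- ===== PORT B =====
-- `v << n` on Python ints is exactly `v * 2 ^ n` (n : Nat here, from bit_length).
def adjust_auto_params_py_alt (cur_out_feature_sets : Int) (cur_kernel_width : Int) (direction : String) : Int × Int :=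
  if direction = "down" then
    if cur_out_feature_sets ≥ cur_kernel_width then
      (cur_out_feature_sets,
       cur_kernel_width * 2 ^ PySem.Int.bitLength (PySem.Int.floordiv cur_out_feature_sets cur_kernel_width))
    else (cur_out_feature_sets, cur_kernel_width)
  else if direction = "up" then
    if cur_out_feature_sets ≤ cur_kernel_width then
      (cur_out_feature_sets * 2 ^ PySem.Int.bitLength (PySem.Int.floordiv cur_kernel_width cur_out_feature_sets),
       cur_kernel_width)
    else (cur_out_feature_sets, cur_kernel_width)
  else
    (cur_out_feature_sets, cur_kernel_width)  -- Python: raise ValueError (excluded by Pre_)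

-- ===== PRECONDITION & SPEC =====
-- Pre_ excludes exactly the inputs where the Python A does not return: directions other
-- than "down"/"up" (ValueError) and the inputs whose doubled quantity starts ≤ 0 while
-- the loop condition holds (the loop then never terminates).
def Pre_adjust_auto_params_py (cur_out_feature_sets : Int) (cur_kernel_width : Int) (direction : String) : Prop :=
  (direction = "down" ∧ (0 < cur_kernel_width ∨ cur_out_feature_sets < cur_kernel_width)) ∨
  (direction = "up" ∧ (0 < cur_out_feature_sets ∨ cur_kernel_width < cur_out_feature_sets))
instance (cur_out_feature_sets : Int) (cur_kernel_width : Int) (direction : String) : Decidable (Pre_adjust_auto_params_py cur_out_feature_sets cur_kernel_width direction) := by unfold Pre_adjust_auto_params_py; infer_instance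

def pvWitness_adjust_auto_params_py : Int × Int × String := (5, 3, "down")

def Spec_adjust_auto_params_py (cur_out_feature_sets : Int) (cur_kernel_width : Int) (direction : String) (out : Int × Int) : Prop := out = adjust_auto_params_py_alt cur_out_feature_sets cur_kernel_width direction
instance (cur_out_feature_sets : Int) (cur_kernel_width : Int) (direction : String) (out : Int × Int) : Decidable (Spec_adjust_auto_params_py cur_out_feature_sets cur_kernel_width direction out) := by unfold Spec_adjust_auto_params_py; infer_instance

-- ===== CLAIM (what is proved, stated in full; the proofs are below) =====
def Claim_equal_adjust_auto_params_py : Prop := ∀ (cur_out_feature_sets : Int) (cur_kernel_width : Int) (direction : String), Dom_adjust_auto_params_py cur_out_feature_sets cur_kernel_width direction → Pre_adjust_auto_params_py cur_out_feature_sets cur_kernel_width direction → Spec_adjust_auto_params_py cur_out_feature_sets cur_kernel_width direction (adjust_auto_params_py cur_out_feature_sets cur_kernel_width direction)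

-- ===== LEMMAS AND PROOFS =====

lemma floordiv_double (a x : Int) (hx : 0 < x) :
    PySem.Int.floordiv a (x * 2) = PySem.Int.floordiv (PySem.Int.floordiv a x) 2 := by
  rw [PySem.Int.floordiv_eq_ediv_of_pos (by omega), PySem.Int.floordiv_eq_ediv_of_pos hx,
    PySem.Int.floordiv_eq_ediv_of_pos (by omega)]
  rw [Int.ediv_ediv_of_nonneg (le_of_lt hx)]

lemma doubleUntilGt_closed (x bound : Int) :
    0 < x → doubleUntilGt x bound =
      if x ≤ bound then x * 2 ^ PySem.Int.bitLength (PySem.Int.floordiv bound x) else x := by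
  fun_induction doubleUntilGt x bound with
  | case1 x h ih =>
    intro hx
    rw [if_pos h.1]
    rw [ih (by omega)]
    have hq1 : (1 : Int) ≤ PySem.Int.floordiv bound x := by
      rw [PySem.Int.le_floordiv_iff_mul_le hx]; omega
    by_cases h2 : x * 2 ≤ bound
    · rw [if_pos h2, floordiv_double bound x hx]
      conv_rhs => rw [PySem.Int.bitLength_of_pos (by omega : (0:Int) < PySem.Int.floordiv bound x)]
      ring
    · rw [if_neg h2]
      have hq : PySem.Int.floordiv bound x = 1 := by
        rw [PySem.Int.floordiv_eq_iff_of_pos hx]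
        constructor <;> omega
      have hb1 : PySem.Int.bitLength (1 : Int) = 1 := by decide
      rw [hq, hb1]
      ring
  | case2 x h =>
    intro hx
    rw [if_neg (by omega)]

lemma doubleUntilGt_stop (x bound : Int) (h : ¬ x ≤ bound) : doubleUntilGt x bound = x := by
  rw [doubleUntilGt, dif_neg (by omega)]

-- ===== VERDICT (by name: the statement is the Claim_ definition above) =====
theorem adjust_auto_params_py_spec : Claim_equal_adjust_auto_params_py := by
  intro o k d _ hpre
  unfold Spec_adjust_auto_params_py adjust_auto_params_py adjust_auto_params_py_alt
  rcases hpre with ⟨hd, hk⟩ | ⟨hd, ho⟩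
  · subst hd
    simp only [String.reduceEq, if_true, if_false, ge_iff_le]
    by_cases hle : k ≤ o
    · have hkpos : 0 < k := by omega
      rw [doubleUntilGt_closed k o hkpos, if_pos hle, if_pos hle]
    · rw [doubleUntilGt_stop k o (by omega), if_neg (by omega)]
  · subst hd
    simp only [String.reduceEq, if_true, if_false, ge_iff_le]
    by_cases hle : o ≤ k
    · have hopos : 0 < o := by omega
      rw [doubleUntilGt_closed o k hopos, if_pos hle, if_pos hle]
    · rw [doubleUntilGt_stop o k (by omega), if_neg (by omega)]
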